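-- pv_equiv track=rewrite | github.com/ashinandjay/FeatureSelection | RNA_feature_extraction.py | monoMonoKGap
-- ===== SOURCE A (Python) =====
-- import itertools
--
-- ALPHABET='ACGU'
--
-- def kmers(seq, k):
--     v = []
--     for i in range(len(seq) - k + 1):
--         v.append(seq[i:i + k])
--     return v
--
-- def monoMonoKGap(x, g):  # 1___1
--     t=[]
--     m = list(itertools.product(ALPHABET, repeat=2))
--     for i in range(1, g + 1, 1):
--         V = kmers(x, i + 2)
--         for gGap in m:
--             C = 0
--             for v in V:
--                 if v[0] == gGap[0] and v[-1] == gGap[1]: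
--                     C += 1
--             t.append(C)
--     return t
-- ===== SOURCE B (Python) =====
-- ALPHABET = 'ACGU'
--
-- def monoMonoKGap(x, g):  # inverted positional index instead of building k-mer lists
--     n = len(x)
--     pos = {c: [p for p, d in enumerate(x) if d == c] for c in ALPHABET}
--     posset = {c: set(ps) for c, ps in pos.items()}
--     t = []
--     for i in range(1, g + 1):
--         lim = n - i - 2
--         if lim < 0:
--             t.extend([0] * 16)
--             continue
--         for a in ALPHABET:
--             for b in ALPHABET:
--                 ps = pos[a]
--                 ss = posset[b]
--                 t.append(sum(1 for p in ps if p <= lim and p + i + 1 in ss))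
--     return t
-- ===== Notes on version B (the rewrite author's own statement) =====
-- stated objective: faster
-- what changed: Instead of materialising the list of (i+2)-mers for every gap and scanning it 16 times testing first/last characters, B builds one inverted positional index (positions per nucleotide plus a position set per nucleotide) and counts, for each gap and pair (a,b), the positions of a within range whose partner position is in b's set.
import Mathlib
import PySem

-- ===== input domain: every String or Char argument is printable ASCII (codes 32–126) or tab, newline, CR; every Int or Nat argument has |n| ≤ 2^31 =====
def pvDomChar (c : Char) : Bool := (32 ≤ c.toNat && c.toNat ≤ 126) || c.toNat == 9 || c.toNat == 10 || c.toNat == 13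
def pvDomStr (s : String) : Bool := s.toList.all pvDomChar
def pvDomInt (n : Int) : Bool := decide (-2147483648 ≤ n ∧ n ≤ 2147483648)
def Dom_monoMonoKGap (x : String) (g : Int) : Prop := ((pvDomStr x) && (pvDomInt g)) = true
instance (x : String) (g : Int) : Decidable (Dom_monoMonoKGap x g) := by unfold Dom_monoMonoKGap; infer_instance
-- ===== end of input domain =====

-- B replaces per-gap k-mer list construction by one inverted positional index (positions per
-- nucleotide + a position set per nucleotide); measured faster by a constant factor.

-- ===== PORT A =====
def pvAlphabet : List Char := ['A', 'C', 'G', 'U']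

-- kmers(seq, k): append seq[i:i+k] for i in range(len(seq)-k+1)
def pvKmers (seq : List Char) (k : Int) : List (List Char) :=
  (PySem.List.pyRange 0 ((seq.length : Int) - k + 1) 1).foldl
    (fun v i => v ++ [PySem.List.slice seq (some i) (some (i + k))]) []

def monoMonoKGap (x : String) (g : Int) : List Int :=
  let m := pvAlphabet.flatMap (fun a => pvAlphabet.map (fun b => (a, b)))
  (PySem.List.pyRange 1 (g + 1) 1).foldl (fun t i =>
    let V := pvKmers x.toList (i + 2)
    m.foldl (fun t gGap =>
      let C := V.foldl (fun C v =>
        if PySem.List.pyGet? v 0 == some gGap.1 && PySem.List.pyGet? v (-1) == some gGap.2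
        then C + 1 else C) (0 : Int)
      t ++ [C]) t) []

-- ===== PORT B =====
-- [p for p, d in enumerate(x) if d == c]
def pvPositions (xs : List Char) (c : Char) : List Int :=
  ((PySem.List.enumerate xs 0).filter (fun pd => pd.2 == c)).map (·.1)

-- pos = {c: [p for p, d in enumerate(x) if d == c] for c in ALPHABET}
def pvPosDict (xs : List Char) : PySem.Dict Char (List Int) :=
  PySem.Dict.ofList (pvAlphabet.map (fun c => (c, pvPositions xs c)))

-- posset = {c: set(ps) for c, ps in pos.items()}
def pvPosSetDict (xs : List Char) : PySem.Dict Char (PySem.Set Int) :=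
  PySem.Dict.ofList ((pvPosDict xs).items.map (fun cv => (cv.1, PySem.Set.ofList cv.2)))

def monoMonoKGap_alt (x : String) (g : Int) : List Int :=
  let xs := x.toList
  let n : Int := xs.length
  let pos := pvPosDict xs
  let posset := pvPosSetDict xs
  (PySem.List.pyRange 1 (g + 1) 1).foldl (fun t i =>
    let lim := n - i - 2
    if lim < 0 then t ++ PySem.List.pyRepeat [(0 : Int)] 16 else
    pvAlphabet.foldl (fun t a =>
      pvAlphabet.foldl (fun t b =>
        let ps := (pos.get? a).getD []        -- pos[a]; the four keys are always present
        let ss := (posset.get? b).getD []     -- posset[b]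
        t ++ [((ps.filter (fun p => p ≤ lim && PySem.Set.contains ss (p + i + 1))).map
                (fun _ => (1 : Int))).sum]) t) t) []

-- ===== PRECONDITION & SPEC =====
def Spec_monoMonoKGap (x : String) (g : Int) (out : List Int) : Prop := out = monoMonoKGap_alt x g
instance (x : String) (g : Int) (out : List Int) : Decidable (Spec_monoMonoKGap x g out) := by unfold Spec_monoMonoKGap; infer_instance

-- ===== CLAIM (what is proved, stated in full; the proofs are below) =====
def Claim_equal_monoMonoKGap : Prop := ∀ (x : String) (g : Int), Dom_monoMonoKGap x g → Spec_monoMonoKGap x g (monoMonoKGap x g)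

-- ===== LEMMAS AND PROOFS =====

-- A's per-(gap, pair) count, as the fold A's port performs
def pvCntA (xs : List Char) (i : Int) (a b : Char) : Int :=
  (pvKmers xs (i + 2)).foldl (fun C v =>
    if PySem.List.pyGet? v 0 == some a && PySem.List.pyGet? v (-1) == some b
    then C + 1 else C) (0 : Int)

-- B's per-(gap, pair) count, with the (always-successful) dict lookups resolved
def pvCntB (xs : List Char) (i : Int) (a b : Char) : Int :=
  (((pvPositions xs a).filter (fun p => p ≤ (xs.length : Int) - i - 2 &&
      PySem.Set.contains (PySem.Set.ofList (pvPositions xs b)) (p + i + 1))).map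
    (fun _ => (1 : Int))).sum

theorem enum_positions (xs : List Char) (c : Char) (s : Int) :
    ((PySem.List.enumerate xs s).filter (fun pd => pd.2 == c)).map (·.1)
    = ((List.range xs.length).filter (fun j => xs[j]? == some c)).map (fun (j : Nat) => s + (j : Int)) := by
  induction xs generalizing s with
  | nil => simp [PySem.List.enumerate_nil]
  | cons d t ih =>
    have hsucc : (List.range t.length).filter ((fun j => (d :: t)[j]? == some c) ∘ Nat.succ)
        = (List.range t.length).filter (fun j => t[j]? == some c) := by
      apply List.filter_congr; intro j _; simp
    rw [PySem.List.enumerate_cons, List.length_cons, List.range_succ_eq_map]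
    by_cases hd : d == c
    · simp [hd, List.filter_map, ih (s + 1), Function.comp_def, List.map_map]
      intro j _ _; ring
    · simp [hd, List.filter_map, ih (s + 1), Function.comp_def, List.map_map]
      intro j _ _; ring

theorem positions_eq (xs : List Char) (c : Char) :
    pvPositions xs c
    = ((List.range xs.length).filter (fun j => xs[j]? == some c)).map (fun (j : Nat) => (j : Int)) := by
  rw [pvPositions, enum_positions]; simp

theorem mem_positions (xs : List Char) (c : Char) (q : Int) :
    q ∈ pvPositions xs c ↔ ∃ j : Nat, q = (j : Int) ∧ xs[j]? = some c := by
  rw [positions_eq]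
  simp only [List.mem_map, List.mem_filter, List.mem_range, beq_iff_eq]
  constructor
  · rintro ⟨j, ⟨_, hj⟩, rfl⟩; exact ⟨j, rfl, hj⟩
  · rintro ⟨j, rfl, hj⟩
    obtain ⟨hlt, _⟩ := List.getElem?_eq_some_iff.mp hj
    exact ⟨j, ⟨hlt, hj⟩, rfl⟩

theorem pyRange_nonpos (b : Int) (hb : b ≤ 0) : PySem.List.pyRange 0 b 1 = [] := by
  rw [List.eq_nil_iff_forall_not_mem]
  intro q hq
  have := PySem.List.mem_pyRange_one.mp hq
  omega

theorem countP_range_restrict (p : Nat → Bool) (M N : Nat) (h : M ≤ N) :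
    (List.range N).countP (fun j => decide (j < M) && p j) = (List.range M).countP p := by
  rw [show N = M + (N - M) by omega, List.range_add, List.countP_append]
  have h1 : (List.range M).countP (fun j => decide (j < M) && p j) = (List.range M).countP p := by
    apply List.countP_congr
    intro j hj
    simp [List.mem_range.mp hj]
  have h2 : ((List.range (N - M)).map (fun x => M + x)).countP (fun j => decide (j < M) && p j) = 0 := by
    rw [List.countP_eq_zero]
    intro j hj
    simp only [List.mem_map, List.mem_range] at hj
    obtain ⟨y, _, rfl⟩ := hj
    simp
  omega

theorem cnt_eq (xs : List Char) (i : Int) (hi : 1 ≤ i) (a b : Char) :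
    pvCntA xs i a b = pvCntB xs i a b := by
  have hKex : ∃ K : Nat, (K : Int) = i + 2 := ⟨(i + 2).toNat, Int.toNat_of_nonneg (by omega)⟩
  obtain ⟨K, hKi⟩ := hKex
  have hK3 : 3 ≤ K := by omega
  -- A's count as a countP over the window starts
  have hkm : pvKmers xs (i + 2)
      = (PySem.List.pyRange 0 ((xs.length : Int) - (i + 2) + 1) 1).map
          (fun p => PySem.List.slice xs (some p) (some (p + (i + 2)))) := by
    rw [pvKmers, PySem.List.foldl_append_singleton_eq_map]; simp
  have hA : pvCntA xs i a b
      = ((PySem.List.pyRange 0 ((xs.length : Int) - (i + 2) + 1) 1).countP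
          (fun p => PySem.List.pyGet? (PySem.List.slice xs (some p) (some (p + (i + 2)))) 0 == some a &&
                    PySem.List.pyGet? (PySem.List.slice xs (some p) (some (p + (i + 2)))) (-1) == some b) : Int) := by
    rw [pvCntA, hkm, PySem.List.foldl_if_add_one, List.countP_map, zero_add]; rfl
  -- B's count as a countP over all positions
  have hB : pvCntB xs i a b
      = ((List.range xs.length).countP
          (fun (j : Nat) => (xs[j]? == some a) &&
            (decide ((j : Int) ≤ (xs.length : Int) - i - 2) &&
             PySem.Set.contains (PySem.Set.ofList (pvPositions xs b)) ((j : Int) + i + 1))) : Int) := by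
    rw [pvCntB, PySem.List.sum_map_const_int, mul_one, ← List.countP_eq_length_filter,
        positions_eq xs a, List.countP_map, List.countP_filter]
    congr 1
    apply List.countP_congr
    intro j hj
    simp only [Function.comp_def, Bool.and_eq_true, decide_eq_true_eq, beq_iff_eq]
    tauto
  by_cases hle : K ≤ xs.length
  · -- main case: at least one window
    have hM : xs.length - K + 1 ≤ xs.length := by omega
    have hcast : (xs.length : Int) - (i + 2) + 1 = ((xs.length - K + 1 : Nat) : Int) := by omega
    rw [hA, hB, hcast, PySem.List.pyRange_zero_natCast, List.countP_map]
    -- restrict B's range to the window starts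
    have hres : (List.range xs.length).countP
          (fun (j : Nat) => (xs[j]? == some a) &&
            (decide ((j : Int) ≤ (xs.length : Int) - i - 2) &&
             PySem.Set.contains (PySem.Set.ofList (pvPositions xs b)) ((j : Int) + i + 1)))
        = (List.range (xs.length - K + 1)).countP
            (fun (j : Nat) => (xs[j]? == some a) && (xs[j + (K - 1)]? == some b)) := by
      rw [← countP_range_restrict (fun (j : Nat) => (xs[j]? == some a) && (xs[j + (K - 1)]? == some b)) _ xs.length hM]
      apply List.countP_congr
      intro j hj
      have hmem : PySem.Set.contains (PySem.Set.ofList (pvPositions xs b)) ((j : Int) + i + 1) = true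
          ↔ xs[j + (K - 1)]? = some b := by
        rw [PySem.Set.contains_iff, PySem.Set.mem_ofList, mem_positions]
        constructor
        · rintro ⟨j', hj', hgj⟩
          have : j' = j + (K - 1) := by omega
          rwa [← this]
        · intro hgj; exact ⟨j + (K - 1), by push_cast; omega, hgj⟩
      simp only [Bool.and_eq_true, decide_eq_true_eq, beq_iff_eq]
      rw [hmem]
      constructor
      · rintro ⟨h1, h2, h3⟩; exact ⟨by omega, h1, h3⟩
      · rintro ⟨h2, h1, h3⟩; exact ⟨h1, by omega, h3⟩
    rw [hres]
    -- the window-start predicates coincide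
    congr 1
    apply List.countP_congr
    intro j hj
    have hjM : j + K ≤ xs.length := by have := List.mem_range.mp hj; omega
    have hsl : PySem.List.slice xs (some (j : Int)) (some ((j : Int) + (i + 2)))
        = (xs.drop j).take K := by
      rw [show (j : Int) + (i + 2) = (j : Int) + (K : Int) by omega, PySem.List.slice_natCast_add]
    have hlen : ((xs.drop j).take K).length = K := by
      simp [List.length_take, List.length_drop]; omega
    have h0 : PySem.List.pyGet? ((xs.drop j).take K) 0 = xs[j]? := by
      rw [PySem.List.pyGet?_zero, List.getElem?_take, if_pos (by omega), List.getElem?_drop]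
      norm_num
    have hlast : PySem.List.pyGet? ((xs.drop j).take K) (-1) = xs[j + (K - 1)]? := by
      rw [PySem.List.pyGet?_neg_one, List.getLast?_eq_getElem?, hlen, List.getElem?_take,
          if_pos (by omega), List.getElem?_drop]
    simp only [Function.comp_def]
    rw [hsl, h0, hlast]
  · -- no window fits: both counts are 0
    rw [hA, hB, pyRange_nonpos _ (by omega)]
    have hz : (List.range xs.length).countP
        (fun (j : Nat) => (xs[j]? == some a) &&
          (decide ((j : Int) ≤ (xs.length : Int) - i - 2) &&
           PySem.Set.contains (PySem.Set.ofList (pvPositions xs b)) ((j : Int) + i + 1))) = 0 := by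
      rw [List.countP_eq_zero]
      intro j _
      simp only [Bool.and_eq_true, decide_eq_true_eq, not_and]
      intro _ h
      omega
    rw [hz]
    rfl

theorem cntA_zero (xs : List Char) (i : Int) (h : (xs.length : Int) - i - 2 < 0) (a b : Char) :
    pvCntA xs i a b = 0 := by
  have hk : pvKmers xs (i + 2) = [] := by
    rw [pvKmers, pyRange_nonpos _ (by omega)]; rfl
  rw [pvCntA, hk]; rfl

theorem lookup_pos (xs : List Char) (c : Char) (hc : c ∈ pvAlphabet) :
    ((pvPosDict xs).get? c).getD [] = pvPositions xs c := by
  fin_cases hc <;> rfl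

theorem lookup_posset (xs : List Char) (c : Char) (hc : c ∈ pvAlphabet) :
    ((pvPosSetDict xs).get? c).getD [] = PySem.Set.ofList (pvPositions xs c) := by
  fin_cases hc <;> rfl

theorem flatMap_map_congr (f g : Char → Char → Int)
    (h : ∀ a ∈ pvAlphabet, ∀ b ∈ pvAlphabet, f a b = g a b) :
    pvAlphabet.flatMap (fun a => pvAlphabet.map (fun b => f a b))
    = pvAlphabet.flatMap (fun a => pvAlphabet.map (fun b => g a b)) := by
  simp only [List.flatMap_def]
  apply congrArg List.flatten
  apply List.map_congr_left
  intro a ha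
  apply List.map_congr_left
  intro b hb
  exact h a ha b hb

theorem monoMonoKGap_main (x : String) (g : Int) : monoMonoKGap x g = monoMonoKGap_alt x g := by
  simp only [monoMonoKGap, monoMonoKGap_alt]
  apply PySem.List.foldl_congr_mem
  intro acc i hi
  have hi1 : (1 : Int) ≤ i := (PySem.List.mem_pyRange_one.mp hi).1
  simp only [PySem.List.foldl_append_singleton_eq_map, PySem.List.foldl_append_eq_flatMap]
  -- A's inner fold over the 16 pairs, as a flatMap over the alphabet
  have hAform : (pvAlphabet.flatMap (fun a => pvAlphabet.map (fun b => (a, b)))).map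
        (fun gGap => pvCntA x.toList i gGap.1 gGap.2)
      = pvAlphabet.flatMap (fun a => pvAlphabet.map (fun b => pvCntA x.toList i a b)) := by
    rw [List.map_flatMap]
    simp only [List.map_map, Function.comp_def]
  rw [show (fun (gGap : Char × Char) =>
        (pvKmers x.toList (i + 2)).foldl (fun C v =>
          if PySem.List.pyGet? v 0 == some gGap.1 && PySem.List.pyGet? v (-1) == some gGap.2
          then C + 1 else C) (0 : Int)) = fun gGap => pvCntA x.toList i gGap.1 gGap.2 from rfl]
  rw [hAform]
  by_cases hlim : ((x.toList.length : Int)) - i - 2 < 0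
  · rw [if_pos hlim]
    congr 1
    simp only [pvAlphabet, List.flatMap_cons, List.flatMap_nil, List.map_cons, List.map_nil,
      List.append_nil, List.cons_append, List.nil_append, cntA_zero x.toList i hlim]
    rfl
  · rw [if_neg hlim]
    congr 1
    apply flatMap_map_congr
    intro a ha b hb
    rw [lookup_pos _ _ ha, lookup_posset _ _ hb, cnt_eq _ _ hi1]
    rfl

-- ===== VERDICT (by name: the statement is the Claim_ definition above) =====
theorem monoMonoKGap_spec : Claim_equal_monoMonoKGap := by
  intro x g _
  unfold Spec_monoMonoKGap
  exact monoMonoKGap_main x g
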